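-- pv_equiv track=rewrite | github.com/igormorais123/pesquisa-eleitoral-df | scripts/sincronizar_entrevistas_sistema.py | calcular_distribuicao_idade
-- ===== SOURCE A (Python) =====
-- from typing import Dict, List, Any, Optional
--
-- def calcular_distribuicao_idade(entrevistas: List[Dict]) -> Dict[str, int]:
--     """Calcula distribuicao por faixas etarias"""
--     faixas = {"16-24": 0, "25-34": 0, "35-44": 0, "45-59": 0, "60+": 0}
--     for ent in entrevistas:
--         idade = ent.get("perfil", {}).get("idade", 0)
--         if idade < 25:
--             faixas["16-24"] += 1
--         elif idade < 35:
--             faixas["25-34"] += 1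
--         elif idade < 45:
--             faixas["35-44"] += 1
--         elif idade < 60:
--             faixas["45-59"] += 1
--         else:
--             faixas["60+"] += 1
--     return faixas
-- ===== SOURCE B (Python) =====
-- # B: staged passes — extract all ages once, then count each bin's range over that list.
-- BINS = [("16-24", None, 25), ("25-34", 25, 35), ("35-44", 35, 45),
--         ("45-59", 45, 60), ("60+", 60, None)]
--
-- def calcular_distribuicao_idade(entrevistas):
--     idades = [ent.get("perfil", {}).get("idade", 0) for ent in entrevistas]
--     return {label: sum(1 for a in idades
--                        if (lo is None or a >= lo) and (hi is None or a < hi))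
--             for label, lo, hi in BINS}
-- ===== Notes on version B (the rewrite author's own statement) =====
-- stated objective: alternative
-- what changed: Instead of one pass with a five-way if/elif chain incrementing a dict in place, B first extracts the list of ages, then builds the result by counting, for each bin's half-open [lo, hi) range, how many ages fall inside it (one counting pass per bin).
import Mathlib
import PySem

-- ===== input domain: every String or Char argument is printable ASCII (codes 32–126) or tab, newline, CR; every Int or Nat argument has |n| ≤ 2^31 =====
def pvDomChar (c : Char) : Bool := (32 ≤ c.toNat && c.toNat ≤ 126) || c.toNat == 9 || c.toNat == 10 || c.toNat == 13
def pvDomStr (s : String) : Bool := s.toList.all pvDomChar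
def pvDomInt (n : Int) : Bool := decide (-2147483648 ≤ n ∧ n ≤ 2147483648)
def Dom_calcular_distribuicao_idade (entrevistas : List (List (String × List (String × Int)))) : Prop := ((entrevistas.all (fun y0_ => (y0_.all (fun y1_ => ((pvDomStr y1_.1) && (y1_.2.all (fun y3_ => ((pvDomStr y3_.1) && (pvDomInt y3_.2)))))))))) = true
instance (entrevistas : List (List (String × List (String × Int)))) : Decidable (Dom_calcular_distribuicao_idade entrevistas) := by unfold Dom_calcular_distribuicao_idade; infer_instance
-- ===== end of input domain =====

-- B extracts the list of ages first, then counts each bin's half-open range over it (staged passes), instead of A's single pass with an if/elif chain mutating a dict.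

-- ===== PORT A =====
def calcular_distribuicao_idade (entrevistas : List (List (String × List (String × Int)))) : List (String × Int) :=
  (entrevistas.foldl (fun faixas ent =>
      let idade := (PySem.Dict.mk ((PySem.Dict.mk ent).getD "perfil" [])).getD "idade" 0
      if idade < 25 then faixas.modify "16-24" 0 (· + 1)
      else if idade < 35 then faixas.modify "25-34" 0 (· + 1)
      else if idade < 45 then faixas.modify "35-44" 0 (· + 1)
      else if idade < 60 then faixas.modify "45-59" 0 (· + 1)
      else faixas.modify "60+" 0 (· + 1))
    (PySem.Dict.mk [("16-24", 0), ("25-34", 0), ("35-44", 0), ("45-59", 0), ("60+", 0)])).items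

-- ===== PORT B =====
def pvBins : List (String × Option Int × Option Int) :=
  [("16-24", none, some 25), ("25-34", some 25, some 35), ("35-44", some 35, some 45),
   ("45-59", some 45, some 60), ("60+", some 60, none)]

def calcular_distribuicao_idade_alt (entrevistas : List (List (String × List (String × Int)))) : List (String × Int) :=
  let idades := entrevistas.map (fun ent =>
    (PySem.Dict.mk ((PySem.Dict.mk ent).getD "perfil" [])).getD "idade" 0)
  pvBins.map (fun bin =>
    (bin.1, (idades.countP (fun a =>
      (bin.2.1.elim true (fun lo => a ≥ lo)) && (bin.2.2.elim true (fun hi => a < hi))) : Int)))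

-- ===== PRECONDITION & SPEC =====
def Spec_calcular_distribuicao_idade (entrevistas : List (List (String × List (String × Int)))) (out : List (String × Int)) : Prop := out = calcular_distribuicao_idade_alt entrevistas
instance (entrevistas : List (List (String × List (String × Int)))) (out : List (String × Int)) : Decidable (Spec_calcular_distribuicao_idade entrevistas out) := by unfold Spec_calcular_distribuicao_idade; infer_instance

-- ===== CLAIM (what is proved, stated in full; the proofs are below) =====
def Claim_equal_calcular_distribuicao_idade : Prop := ∀ (entrevistas : List (List (String × List (String × Int)))), Dom_calcular_distribuicao_idade entrevistas → Spec_calcular_distribuicao_idade entrevistas (calcular_distribuicao_idade entrevistas)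

-- ===== LEMMAS AND PROOFS =====

-- age-extraction shared by both ports
def pvAge (ent : List (String × List (String × Int))) : Int :=
  (PySem.Dict.mk ((PySem.Dict.mk ent).getD "perfil" [])).getD "idade" 0

theorem pv_main (l : List (List (String × List (String × Int)))) :
    ∀ (c0 c1 c2 c3 c4 : Int),
    (l.foldl (fun faixas ent =>
      let idade := pvAge ent
      if idade < 25 then faixas.modify "16-24" 0 (· + 1)
      else if idade < 35 then faixas.modify "25-34" 0 (· + 1)
      else if idade < 45 then faixas.modify "35-44" 0 (· + 1)
      else if idade < 60 then faixas.modify "45-59" 0 (· + 1)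
      else faixas.modify "60+" 0 (· + 1))
     (PySem.Dict.mk [("16-24", c0), ("25-34", c1), ("35-44", c2), ("45-59", c3), ("60+", c4)])).items
    = [("16-24", c0 + ((l.map pvAge).countP (fun a => a < 25) : Int)),
       ("25-34", c1 + ((l.map pvAge).countP (fun a => a ≥ 25 && a < 35) : Int)),
       ("35-44", c2 + ((l.map pvAge).countP (fun a => a ≥ 35 && a < 45) : Int)),
       ("45-59", c3 + ((l.map pvAge).countP (fun a => a ≥ 45 && a < 60) : Int)),
       ("60+", c4 + ((l.map pvAge).countP (fun a => a ≥ 60) : Int))] := by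
  induction l with
  | nil =>
    intro c0 c1 c2 c3 c4
    simp [PySem.Dict.items]
  | cons ent rest ih =>
    intro c0 c1 c2 c3 c4
    simp only [List.foldl_cons, List.map_cons, List.countP_cons]
    generalize pvAge ent = idade
    by_cases h1 : idade < 25
    · rw [show (PySem.Dict.mk [("16-24", c0), ("25-34", c1), ("35-44", c2), ("45-59", c3), ("60+", c4)]).modify "16-24" 0 (· + 1)
            = PySem.Dict.mk [("16-24", c0 + 1), ("25-34", c1), ("35-44", c2), ("45-59", c3), ("60+", c4)] from by
        simp [PySem.Dict.modify, PySem.Dict.insert, PySem.Dict.getD, PySem.Dict.get?, PySem.Dict.contains]]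
      rw [if_pos h1, ih]
      have h2 : ¬ idade ≥ 25 := by omega
      have h5 : ¬ idade ≥ 60 := by omega
      simp [h1, h2, h5]; omega
    by_cases h2 : idade < 35
    · rw [if_neg h1, if_pos h2,
        show (PySem.Dict.mk [("16-24", c0), ("25-34", c1), ("35-44", c2), ("45-59", c3), ("60+", c4)]).modify "25-34" 0 (· + 1)
            = PySem.Dict.mk [("16-24", c0), ("25-34", c1 + 1), ("35-44", c2), ("45-59", c3), ("60+", c4)] from by
        simp [PySem.Dict.modify, PySem.Dict.insert, PySem.Dict.getD, PySem.Dict.get?, PySem.Dict.contains], ih]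
      have : idade ≥ 25 := by omega
      have h3 : ¬ idade ≥ 35 := by omega
      have h5 : ¬ idade ≥ 60 := by omega
      simp [h1, h2, h3, h5, this]; omega
    by_cases h3 : idade < 45
    · rw [if_neg h1, if_neg h2, if_pos h3,
        show (PySem.Dict.mk [("16-24", c0), ("25-34", c1), ("35-44", c2), ("45-59", c3), ("60+", c4)]).modify "35-44" 0 (· + 1)
            = PySem.Dict.mk [("16-24", c0), ("25-34", c1), ("35-44", c2 + 1), ("45-59", c3), ("60+", c4)] from by
        simp [PySem.Dict.modify, PySem.Dict.insert, PySem.Dict.getD, PySem.Dict.get?, PySem.Dict.contains], ih]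
      have ha : idade ≥ 35 := by omega
      have hb : ¬ idade < 35 := by omega
      have h5 : ¬ idade ≥ 60 := by omega
      simp [h1, hb, h3, ha, h5]; omega
    by_cases h4 : idade < 60
    · rw [if_neg h1, if_neg h2, if_neg h3, if_pos h4,
        show (PySem.Dict.mk [("16-24", c0), ("25-34", c1), ("35-44", c2), ("45-59", c3), ("60+", c4)]).modify "45-59" 0 (· + 1)
            = PySem.Dict.mk [("16-24", c0), ("25-34", c1), ("35-44", c2), ("45-59", c3 + 1), ("60+", c4)] from by
        simp [PySem.Dict.modify, PySem.Dict.insert, PySem.Dict.getD, PySem.Dict.get?, PySem.Dict.contains], ih]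
      have ha : idade ≥ 45 := by omega
      have hb : ¬ idade < 35 := by omega
      have hc : ¬ idade < 45 := by omega
      have h5 : ¬ idade ≥ 60 := by omega
      simp [h1, hb, hc, h4, ha, h5]; omega
    · rw [if_neg h1, if_neg h2, if_neg h3, if_neg h4,
        show (PySem.Dict.mk [("16-24", c0), ("25-34", c1), ("35-44", c2), ("45-59", c3), ("60+", c4)]).modify "60+" 0 (· + 1)
            = PySem.Dict.mk [("16-24", c0), ("25-34", c1), ("35-44", c2), ("45-59", c3), ("60+", c4 + 1)] from by
        simp [PySem.Dict.modify, PySem.Dict.insert, PySem.Dict.getD, PySem.Dict.get?, PySem.Dict.contains], ih]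
      have ha : idade ≥ 60 := by omega
      have hb : ¬ idade < 35 := by omega
      have hc : ¬ idade < 45 := by omega
      have hd : ¬ idade < 60 := by omega
      simp [h1, hb, hc, hd, ha]; omega

-- ===== VERDICT (by name: the statement is the Claim_ definition above) =====
theorem calcular_distribuicao_idade_spec : Claim_equal_calcular_distribuicao_idade := by
  intro entrevistas _
  unfold Spec_calcular_distribuicao_idade calcular_distribuicao_idade
  exact (pv_main entrevistas 0 0 0 0 0).trans
    (by simp [calcular_distribuicao_idade_alt, pvBins, ge_iff_le]; exact ⟨rfl, rfl, rfl, rfl, rfl⟩)
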